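-- pv_equiv track=rewrite | github.com/SanskarLoganDev/leetcode-academy | Interview-Questions/TCS/Round_2/toggle_ratio.py | get_cost
-- ===== SOURCE A (Python) =====
-- def get_cost(from_pat, to_pat, X, Y):
--     """
--     Calculates toggle cost. Returns -1 if not exactly 1 toggle.
--     """
--     s1 = "".join(from_pat)
--     s2 = "".join(to_pat)
--     if len(s1) != len(s2): return -1
--
--     diffs = 0
--     cost = 0
--
--     for c1, c2 in zip(s1, s2):
--         # A segment is ON if it is not a space
--         # We use strip() to handle potentially different whitespace chars if any
--         is_on_1 = c1.strip() != ''
--         is_on_2 = c2.strip() != ''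
--
--         if is_on_1 == is_on_2:
--             continue
--
--         diffs += 1
--         if diffs > 1: return -1
--
--         if is_on_1 and not is_on_2:
--             cost += X # ON to OFF
--         else:
--             cost += Y # OFF to ON
--
--     return cost if diffs == 1 else -1
-- ===== SOURCE B (Python) =====
-- def get_cost(from_pat, to_pat, X, Y):
--     s1 = "".join(from_pat)
--     s2 = "".join(to_pat)
--     if len(s1) != len(s2):
--         return -1
--     # index sets of ON segments in each pattern
--     on1 = {i for i, c in enumerate(s1) if c.strip() != ''}
--     on2 = {i for i, c in enumerate(s2) if c.strip() != ''}
--     turned_off = on1 - on2   # ON -> OFF positions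
--     turned_on = on2 - on1    # OFF -> ON positions
--     if len(turned_off) + len(turned_on) != 1:
--         return -1
--     return X if turned_off else Y
-- ===== Notes on version B (the rewrite author's own statement) =====
-- stated objective: alternative
-- what changed: B never compares the two strings position by position: it builds the set of ON-segment indices of each string separately, takes the two set differences (indices turned off, indices turned on), and decides from the sizes of those two sets, replacing A's early-exiting zipped scan with mutable diffs/cost accumulators.
import Mathlib
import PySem

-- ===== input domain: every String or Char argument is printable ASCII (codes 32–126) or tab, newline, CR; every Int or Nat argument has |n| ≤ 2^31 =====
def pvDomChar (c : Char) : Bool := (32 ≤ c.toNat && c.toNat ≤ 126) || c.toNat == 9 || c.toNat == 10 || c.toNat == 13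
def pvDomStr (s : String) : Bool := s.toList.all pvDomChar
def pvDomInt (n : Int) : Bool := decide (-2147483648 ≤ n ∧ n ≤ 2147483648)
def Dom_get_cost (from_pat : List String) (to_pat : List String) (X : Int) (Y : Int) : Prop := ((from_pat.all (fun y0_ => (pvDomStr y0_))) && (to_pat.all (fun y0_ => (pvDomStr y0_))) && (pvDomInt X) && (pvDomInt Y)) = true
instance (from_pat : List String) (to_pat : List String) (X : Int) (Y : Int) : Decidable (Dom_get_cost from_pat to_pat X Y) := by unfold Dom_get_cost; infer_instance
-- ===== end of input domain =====

-- B avoids A's positional zipped scan entirely: it builds each string's list of ON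
-- indices, takes the two asymmetric differences and classifies those (objective: alternative).

-- ===== PORT A =====
-- c.strip() != '' for a single character c (used by both Pythons verbatim)
def pvIsOn (c : Char) : Bool := PySem.Chars.strip [c] != []

-- the for-loop over zip(s1, s2) with accumulators diffs and cost; early returns become results
def get_cost_loop (X Y : Int) : List (Char × Char) → Int → Int → Int
  | [], diffs, cost => if diffs == 1 then cost else -1
  | (c1, c2) :: rest, diffs, cost =>
      if pvIsOn c1 == pvIsOn c2 then get_cost_loop X Y rest diffs cost
      else if diffs + 1 > 1 then -1
      else if pvIsOn c1 && !(pvIsOn c2) then get_cost_loop X Y rest (diffs + 1) (cost + X)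
      else get_cost_loop X Y rest (diffs + 1) (cost + Y)

def get_cost (from_pat : List String) (to_pat : List String) (X : Int) (Y : Int) : Int :=
  let s1 := PySem.Chars.join [] (from_pat.map String.toList)
  let s2 := PySem.Chars.join [] (to_pat.map String.toList)
  if s1.length ≠ s2.length then -1
  else get_cost_loop X Y (s1.zip s2) 0 0

-- ===== PORT B =====
-- {i for i, c in enumerate(s) if c.strip() != ''} — the set of ON-segment indices
def pvOnIdx (s : List Char) : PySem.Set Int :=
  PySem.Set.ofList (((PySem.List.enumerate s).filter (fun p => pvIsOn p.2)).map (·.1))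

def get_cost_alt (from_pat : List String) (to_pat : List String) (X : Int) (Y : Int) : Int :=
  let s1 := PySem.Chars.join [] (from_pat.map String.toList)
  let s2 := PySem.Chars.join [] (to_pat.map String.toList)
  if s1.length ≠ s2.length then -1
  else
    let on1 := pvOnIdx s1
    let on2 := pvOnIdx s2
    let turned_off := PySem.Set.diff on1 on2
    let turned_on := PySem.Set.diff on2 on1
    if PySem.Set.len turned_off + PySem.Set.len turned_on ≠ 1 then -1
    else if !turned_off.isEmpty then X else Y

-- ===== PRECONDITION & SPEC =====
def Spec_get_cost (from_pat : List String) (to_pat : List String) (X : Int) (Y : Int) (out : Int) : Prop := out = get_cost_alt from_pat to_pat X Y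
instance (from_pat : List String) (to_pat : List String) (X : Int) (Y : Int) (out : Int) : Decidable (Spec_get_cost from_pat to_pat X Y out) := by unfold Spec_get_cost; infer_instance

-- ===== CLAIM (what is proved, stated in full; the proofs are below) =====
def Claim_equal_get_cost : Prop := ∀ (from_pat : List String) (to_pat : List String) (X : Int) (Y : Int), Dom_get_cost from_pat to_pat X Y → Spec_get_cost from_pat to_pat X Y (get_cost from_pat to_pat X Y)

-- ===== LEMMAS AND PROOFS =====

-- the differing s1-characters, as A's loop sees them
def pvChanges (l : List (Char × Char)) : List Char :=
  (l.filter (fun p => pvIsOn p.1 != pvIsOn p.2)).map (·.1)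

-- ON indices starting from offset k (pvOnIdx s = pvOnIdxF 0 s)
def pvOnIdxF (k : Int) (s : List Char) : List Int :=
  ((PySem.List.enumerate s k).filter (fun p => pvIsOn p.2)).map (·.1)

-- the ON→OFF indices of the aligned pair of strings, from offset k
def pvDIdx : Int → List Char → List Char → List Int
  | k, c :: a, d :: b => (if pvIsOn c && !(pvIsOn d) then [k] else []) ++ pvDIdx (k + 1) a b
  | _, _, _ => []

theorem pvOnIdxF_nil (k : Int) : pvOnIdxF k [] = [] := by
  simp [pvOnIdxF, PySem.List.enumerate_nil]

theorem pvOnIdxF_cons (k : Int) (c : Char) (s : List Char) :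
    pvOnIdxF k (c :: s) = (if pvIsOn c then [k] else []) ++ pvOnIdxF (k + 1) s := by
  simp only [pvOnIdxF, PySem.List.enumerate_cons, List.filter_cons]
  by_cases h : pvIsOn c <;> simp [h]

theorem le_of_mem_pvOnIdxF (k : Int) (s : List Char) (i : Int) (h : i ∈ pvOnIdxF k s) : k ≤ i := by
  induction s generalizing k with
  | nil => simp [pvOnIdxF_nil] at h
  | cons c s ih =>
    rw [pvOnIdxF_cons] at h
    rcases List.mem_append.mp h with h1 | h2
    · by_cases hc : pvIsOn c <;> simp [hc] at h1; omega
    · have := ih (k + 1) h2; omega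

theorem nodup_pvOnIdxF (k : Int) (s : List Char) : (pvOnIdxF k s).Nodup := by
  induction s generalizing k with
  | nil => simp [pvOnIdxF_nil]
  | cons c s ih =>
    rw [pvOnIdxF_cons]
    by_cases hc : pvIsOn c
    · have hk : k ∉ pvOnIdxF (k + 1) s := fun h => by
        have := le_of_mem_pvOnIdxF (k + 1) s k h; omega
      simp [hc, List.nodup_cons, hk, ih (k + 1)]
    · simpa [hc] using ih (k + 1)

-- the asymmetric-difference filter B computes equals the aligned ON→OFF index list
theorem filter_pvOnIdxF (a b : List Char) (hlen : a.length = b.length) : ∀ k : Int,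
    (pvOnIdxF k a).filter (fun i => !((pvOnIdxF k b).contains i)) = pvDIdx k a b := by
  induction a generalizing b with
  | nil =>
    intro k
    cases b with
    | nil => simp [pvOnIdxF_nil, pvDIdx]
    | cons d b => simp at hlen
  | cons c a ih =>
    intro k
    cases b with
    | nil => simp at hlen
    | cons d b =>
      have hlen' : a.length = b.length := by simpa using hlen
      rw [pvOnIdxF_cons, pvOnIdxF_cons, List.filter_append]
      have hknot : k ∉ pvOnIdxF (k + 1) b := fun h => by
        have := le_of_mem_pvOnIdxF (k + 1) b k h; omega
      have hhead : ((if pvIsOn c then [k] else []).filter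
          (fun i => !(((if pvIsOn d then [k] else []) ++ pvOnIdxF (k + 1) b).contains i)))
          = (if pvIsOn c && !(pvIsOn d) then [k] else []) := by
        by_cases hc : pvIsOn c <;> by_cases hd : pvIsOn d <;>
          simp [hc, hd, hknot]
      have htail : ((pvOnIdxF (k + 1) a).filter
          (fun i => !(((if pvIsOn d then [k] else []) ++ pvOnIdxF (k + 1) b).contains i)))
          = (pvOnIdxF (k + 1) a).filter (fun i => !((pvOnIdxF (k + 1) b).contains i)) := by
        apply List.filter_congr
        intro i hi
        have hki : k + 1 ≤ i := le_of_mem_pvOnIdxF (k + 1) a i hi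
        have : i ≠ k := by omega
        by_cases hd : pvIsOn d <;> simp [hd, this]
      rw [hhead, htail, ih b hlen' (k + 1)]
      simp [pvDIdx]

-- the two difference lists versus A's list of differing characters
theorem pvDIdx_changes (a b : List Char) : ∀ k : Int,
    (pvDIdx k a b).length + (pvDIdx k b a).length = (pvChanges (a.zip b)).length ∧
    (∀ c0, pvChanges (a.zip b) = [c0] → ((pvDIdx k a b).isEmpty = !(pvIsOn c0))) := by
  induction a generalizing b with
  | nil => intro k; cases b <;> simp [pvDIdx, pvChanges]
  | cons c a ih =>
    intro k
    cases b with
    | nil => simp [pvDIdx, pvChanges]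
    | cons d b =>
      constructor
      · have hIH := (ih b (k + 1)).1
        simp only [pvChanges, List.length_map] at hIH ⊢
        by_cases hc : pvIsOn c <;> by_cases hd : pvIsOn d <;>
          simp [pvDIdx, hc, hd] <;> omega
      · intro c0 h0
        have hch : pvChanges ((c :: a).zip (d :: b))
            = (if pvIsOn c != pvIsOn d then [c] else []) ++ pvChanges (a.zip b) := by
          by_cases h : pvIsOn c = pvIsOn d <;> simp [pvChanges, h]
        rw [hch] at h0
        by_cases hcd : pvIsOn c = pvIsOn d
        · have hne : (pvIsOn c != pvIsOn d) = false := by simp [hcd]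
          rw [hne] at h0; simp at h0
          have htail := (ih b (k + 1)).2 c0 h0
          simp [pvDIdx, hcd, htail]
        · have hne : (pvIsOn c != pvIsOn d) = true := by
            cases h1 : pvIsOn c <;> cases h2 : pvIsOn d <;> simp_all
          rw [hne] at h0; simp at h0
          obtain ⟨hc0, hrest⟩ := h0
          have hs := (ih b (k + 1)).1
          rw [hrest] at hs
          simp only [List.length_nil] at hs
          have h1 : pvDIdx (k + 1) a b = [] :=
            List.eq_nil_of_length_eq_zero (by omega)
          rw [← hc0]
          cases hon : pvIsOn c <;> cases hod : pvIsOn d <;> simp_all [pvDIdx]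

-- A's loop, started with diffs = 0 (resp. diffs = 1), in terms of pvChanges
theorem get_cost_loop_spec (X Y : Int) (l : List (Char × Char)) : ∀ cost : Int,
    (get_cost_loop X Y l 0 cost =
      (match pvChanges l with
       | [c] => cost + (if pvIsOn c then X else Y)
       | _ => -1)) ∧
    (get_cost_loop X Y l 1 cost = if pvChanges l = [] then cost else -1) := by
  induction l with
  | nil => intro cost; simp [get_cost_loop, pvChanges]
  | cons p rest ih =>
    intro cost
    obtain ⟨c1, c2⟩ := p
    by_cases h : pvIsOn c1 = pvIsOn c2
    · have hf : (pvIsOn c1 != pvIsOn c2) = false := by simp [h]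
      constructor
      · simpa [get_cost_loop, pvChanges, h, hf] using (ih cost).1
      · simpa [get_cost_loop, pvChanges, h, hf] using (ih cost).2
    · have ht : (pvIsOn c1 != pvIsOn c2) = true := by
        cases h1 : pvIsOn c1 <;> cases h2 : pvIsOn c2 <;> simp_all
      have hch : pvChanges ((c1, c2) :: rest) = c1 :: pvChanges rest := by
        simp [pvChanges, ht]
      constructor
      · have hbr : (if pvIsOn c1 && !(pvIsOn c2) then get_cost_loop X Y rest 1 (cost + X)
                    else get_cost_loop X Y rest 1 (cost + Y))
                  = get_cost_loop X Y rest 1 (cost + (if pvIsOn c1 then X else Y)) := by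
          cases h1 : pvIsOn c1 <;> cases h2 : pvIsOn c2 <;> simp_all
        rw [show get_cost_loop X Y ((c1, c2) :: rest) 0 cost
              = (if pvIsOn c1 && !(pvIsOn c2) then get_cost_loop X Y rest 1 (cost + X)
                 else get_cost_loop X Y rest 1 (cost + Y)) by
            simp [get_cost_loop, h], hbr, hch,
            (ih (cost + (if pvIsOn c1 then X else Y))).2]
        rcases pvChanges rest with _ | ⟨d, ds⟩ <;> simp
      · rw [show get_cost_loop X Y ((c1, c2) :: rest) 1 cost = -1 by
              simp [get_cost_loop, h], hch]
        simp

-- ===== VERDICT (by name: the statement is the Claim_ definition above) =====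
theorem get_cost_spec : Claim_equal_get_cost := by
  intro from_pat to_pat X Y _
  unfold Spec_get_cost get_cost get_cost_alt
  set s1 := PySem.Chars.join [] (from_pat.map String.toList)
  set s2 := PySem.Chars.join [] (to_pat.map String.toList)
  by_cases hlen : s1.length ≠ s2.length
  · simp [hlen]
  · simp only [ne_eq, not_not] at hlen
    simp only [hlen, ne_eq, not_true_eq_false, if_false]
    rw [(get_cost_loop_spec X Y (s1.zip s2) 0).1]
    have h1 : pvOnIdx s1 = pvOnIdxF 0 s1 :=
      PySem.Set.ofList_eq_self_of_nodup _ (nodup_pvOnIdxF 0 s1)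
    have h2 : pvOnIdx s2 = pvOnIdxF 0 s2 :=
      PySem.Set.ofList_eq_self_of_nodup _ (nodup_pvOnIdxF 0 s2)
    rw [h1, h2]
    simp only [PySem.Set.diff, PySem.Set.len, PySem.Set.contains]
    simp only [filter_pvOnIdxF s1 s2 hlen 0, filter_pvOnIdxF s2 s1 hlen.symm 0]
    obtain ⟨hsum, hsing⟩ := pvDIdx_changes s1 s2 0
    rcases hc : pvChanges (s1.zip s2) with _ | ⟨c, _ | ⟨d, ds⟩⟩
    · rw [hc] at hsum; simp at hsum
      simp [hsum.1, hsum.2]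
    · have hemp := hsing c hc
      rw [hc] at hsum; simp at hsum
      rw [if_neg (by push_cast; omega), hemp]
      cases hon : pvIsOn c <;> simp [hon]
    · rw [hc] at hsum; simp at hsum
      rw [if_pos (by push_cast; omega)]
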